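-- pv_equiv track=rewrite | github.com/raph2611toky/RAGATHON | Madagascar Education Statistics Q&A/codes/data_extraction.py | fill_merged_cells
-- ===== SOURCE A (Python) =====
-- from typing import List, Tuple, Dict, Optional
--
-- def fill_merged_cells(tbl: List[List[Optional[str]]]) -> List[List[Optional[str]]]:
--     """
--     Fill merged cells by propagating values horizontally and vertically.
--     This handles common merged cell issues in PDF tables.
--     """
--     num_rows = len(tbl)
--     if num_rows == 0:
--         return []
--
--     num_cols = max(len(row) for row in tbl)
--
--     # Pad rows with None
--     for row in tbl:
--         row += [None] * (num_cols - len(row))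
--
--     # Fill horizontal merges (left to right)
--     for r in range(num_rows):
--         for c in range(1, num_cols):
--             if tbl[r][c] is None and tbl[r][c - 1] is not None:
--                 tbl[r][c] = tbl[r][c - 1]
--
--     # Fill vertical merges (top to bottom)
--     for c in range(num_cols):
--         for r in range(1, num_rows):
--             if tbl[r][c] is None and tbl[r - 1][c] is not None:
--                 tbl[r][c] = tbl[r - 1][c]
--
--     return tbl
-- ===== SOURCE B (Python) =====
-- from typing import List, Optional
--
-- def fill_merged_cells(tbl: List[List[Optional[str]]]) -> List[List[Optional[str]]]:
--     """Per-cell direct computation: each output cell is the first non-None value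
--     found scanning its own row leftwards from its column, then earlier rows
--     bottom-up (each scanned from that column leftwards).  No propagation state.
--     The rows of tbl are then overwritten in place and tbl is returned."""
--     if not tbl:
--         return []
--     num_cols = max(len(row) for row in tbl)
--
--     def lookup(r: int, c: int) -> Optional[str]:
--         for rr in range(r, -1, -1):
--             row = tbl[rr]
--             for cc in range(min(c, len(row) - 1), -1, -1):
--                 if row[cc] is not None:
--                     return row[cc]
--         return None
--
--     result = [[lookup(r, c) for c in range(num_cols)] for r in range(len(tbl))]
--     for row, new in zip(tbl, result):
--         row[:] = new
--     return tbl
-- ===== Notes on version B (the rewrite author's own statement) =====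
-- stated objective: alternative
-- what changed: Replaces A's two in-place propagation passes (horizontal forward-fill of every row, then column-wise top-down fill) by a direct per-cell computation with no propagation state: each output cell is the first non-None value found scanning its own row leftwards from its column and then earlier rows bottom-up, the new rows being spliced back into tbl.
import Mathlib
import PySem

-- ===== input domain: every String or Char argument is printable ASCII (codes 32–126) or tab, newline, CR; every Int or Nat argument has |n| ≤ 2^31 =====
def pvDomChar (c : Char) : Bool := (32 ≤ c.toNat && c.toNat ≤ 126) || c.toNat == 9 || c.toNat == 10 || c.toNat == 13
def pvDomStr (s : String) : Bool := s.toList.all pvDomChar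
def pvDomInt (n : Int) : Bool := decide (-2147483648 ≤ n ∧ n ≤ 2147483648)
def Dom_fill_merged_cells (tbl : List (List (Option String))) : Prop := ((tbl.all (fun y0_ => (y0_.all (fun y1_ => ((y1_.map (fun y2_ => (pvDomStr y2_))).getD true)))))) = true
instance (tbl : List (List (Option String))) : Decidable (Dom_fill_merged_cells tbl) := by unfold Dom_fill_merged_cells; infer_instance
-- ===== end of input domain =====

-- B replaces A's two in-place propagation passes by a direct per-cell computation: each output
-- cell is the first non-None found scanning its row leftwards from its column, then earlier rows
-- bottom-up. Both Pythons mutate tbl in place and return it; the equivalence proved here is about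
-- the return value.

-- ===== PORT A =====
-- if tbl[r][c] is None and tbl[r][c-1] is not None: tbl[r][c] = tbl[r][c-1]
def pvHstep (row : List (Option String)) (c : Nat) : List (Option String) :=
  if row.getD c none = none ∧ row.getD (c - 1) none ≠ none then row.set c (row.getD (c - 1) none) else row

def pvGetC (t : List (List (Option String))) (r c : Nat) : Option String := (t.getD r []).getD c none

def pvSetC (t : List (List (Option String))) (r c : Nat) (v : Option String) : List (List (Option String)) :=
  t.set r ((t.getD r []).set c v)

-- if tbl[r][c] is None and tbl[r-1][c] is not None: tbl[r][c] = tbl[r-1][c]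
def pvVstep (t : List (List (Option String))) (r c : Nat) : List (List (Option String)) :=
  if pvGetC t r c = none ∧ pvGetC t (r - 1) c ≠ none then pvSetC t r c (pvGetC t (r - 1) c) else t

def fill_merged_cells (tbl : List (List (Option String))) : List (List (Option String)) :=
  let num_rows := tbl.length
  if num_rows = 0 then []
  else
    let num_cols := (tbl.map (fun row => row.length)).foldl max 0
    -- row += [None] * (num_cols - len(row))
    let t1 := tbl.map (fun row => row ++ List.replicate (num_cols - row.length) none)
    -- for r in range(num_rows): for c in range(1, num_cols): …
    let t2 := t1.map (fun row => (List.range' 1 (num_cols - 1)).foldl pvHstep row)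
    -- for c in range(num_cols): for r in range(1, num_rows): …
    (List.range num_cols).foldl
      (fun t c => (List.range' 1 (num_rows - 1)).foldl (fun t' r => pvVstep t' r c) t) t2

-- ===== PORT B =====
-- the inner loop of Source B's lookup: for cc in range(min(c, len(row)-1), -1, -1): first non-None.
-- On an empty row Python's range is empty; here the start index clamps to 0 and getD yields none,
-- the same outcome (no value found in that row).
def pvScanRow (row : List (Option String)) : Nat → Option String
  | 0 => row.getD 0 none
  | cc + 1 =>
    match row.getD (cc + 1) none with
    | some v => some v
    | none => pvScanRow row cc

-- the outer loop of Source B's lookup: for rr in range(r, -1, -1)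
def pvLookup (tbl : List (List (Option String))) : Nat → Nat → Option String
  | 0, c => pvScanRow (tbl.getD 0 []) (min c ((tbl.getD 0 []).length - 1))
  | r + 1, c =>
    match pvScanRow (tbl.getD (r + 1) []) (min c ((tbl.getD (r + 1) []).length - 1)) with
    | some v => some v
    | none => pvLookup tbl r c

def fill_merged_cells_alt (tbl : List (List (Option String))) : List (List (Option String)) :=
  if tbl.isEmpty then []
  else
    let num_cols := (tbl.map (fun row => row.length)).foldl max 0
    -- result = [[lookup(r, c) for c in range(num_cols)] for r in range(len(tbl))]
    (List.range tbl.length).map (fun r => (List.range num_cols).map (fun c => pvLookup tbl r c))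

-- ===== PRECONDITION & SPEC =====
def Spec_fill_merged_cells (tbl : List (List (Option String))) (out : List (List (Option String))) : Prop := out = fill_merged_cells_alt tbl
instance (tbl : List (List (Option String))) (out : List (List (Option String))) : Decidable (Spec_fill_merged_cells tbl out) := by unfold Spec_fill_merged_cells; infer_instance

-- ===== CLAIM (what is proved, stated in full; the proofs are below) =====
def Claim_equal_fill_merged_cells : Prop := ∀ (tbl : List (List (Option String))), Dom_fill_merged_cells tbl → Spec_fill_merged_cells tbl (fill_merged_cells tbl)

-- ===== LEMMAS AND PROOFS =====

-- x if x is not None else p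
def pvMerge (x p : Option String) : Option String :=
  match x with
  | none => p
  | some v => some v

-- model of A's horizontal pass on one row: forward fill with a running value
def pvHfill : Option String → List (Option String) → List (Option String)
  | _, [] => []
  | last, none :: xs => last :: pvHfill last xs
  | _, some v :: xs => some v :: pvHfill (some v) xs

-- running "last non-None" value after scanning xs
def pvHlast : Option String → List (Option String) → Option String
  | last, [] => last
  | last, none :: xs => pvHlast last xs
  | _, some v :: xs => pvHlast (some v) xs

-- model of A's vertical stage: each row merged with the finished previous row
def pvVfill (prev : List (Option String)) : List (List (Option String)) → List (List (Option String))
  | [] => []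
  | row :: rest => List.zipWith pvMerge row prev :: pvVfill (List.zipWith pvMerge row prev) rest

-- forward fill of column c only, running value p
def pvColfill (c : Nat) : Option String → List (List (Option String)) → List (List (Option String))
  | _, [] => []
  | p, row :: rest =>
      row.set c (pvMerge (row.getD c none) p) :: pvColfill c (pvMerge (row.getD c none) p) rest

-- the running value of that forward fill after scanning xs
def pvClast (c : Nat) : Option String → List (List (Option String)) → Option String
  | p, [] => p
  | p, row :: rest => pvClast c (pvMerge (row.getD c none) p) rest

-- one finished row after A's horizontal stage: pad then forward-fill
def pvG (m : Nat) (row : List (Option String)) : List (Option String) :=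
  pvHfill none (row ++ List.replicate (m - row.length) none)

-- first non-None among rows[r][c], rows[r-1][c], …, rows[0][c], prev[c]
def pvLH (rows : List (List (Option String))) (prev : List (Option String)) : Nat → Nat → Option String
  | 0, c => pvMerge ((rows.getD 0 []).getD c none) (prev.getD c none)
  | r + 1, c => pvMerge ((rows.getD (r + 1) []).getD c none) (pvLH rows prev r c)

theorem pvMerge_none_right (x : Option String) : pvMerge x none = x := by cases x <;> rfl

theorem pv_set_getD_self (l : List (Option String)) (c : Nat) (h : c < l.length) :
    l.set c (l.getD c none) = l := by
  rw [List.getD_eq_getElem l none h]; exact List.set_getElem_self h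

theorem pvHfill_length (last : Option String) (xs : List (Option String)) :
    (pvHfill last xs).length = xs.length := by
  induction xs generalizing last with
  | nil => rfl
  | cons x xs ih => cases x <;> simp [pvHfill, ih]

theorem pvHfill_snoc (last : Option String) (xs : List (Option String)) (x : Option String) :
    pvHfill last (xs ++ [x]) = pvHfill last xs ++ [pvMerge x (pvHlast last xs)] := by
  induction xs generalizing last with
  | nil => cases x <;> rfl
  | cons y ys ih => cases y <;> simp [pvHfill, pvHlast, ih]

theorem pvHfill_getD_last : ∀ (xs : List (Option String)) (last : Option String), xs ≠ [] →
    (pvHfill last xs).getD (xs.length - 1) none = pvHlast last xs := by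
  intro xs
  induction xs with
  | nil => intro _ h; exact absurd rfl h
  | cons x xs ih =>
    intro last _
    cases xs with
    | nil => cases x <;> simp [pvHfill, pvHlast]
    | cons y ys =>
      have hne : (y :: ys) ≠ [] := by simp
      cases x with
      | none => simpa [pvHfill, pvHlast, List.getD_cons_succ] using ih last hne
      | some v => simpa [pvHfill, pvHlast, List.getD_cons_succ] using ih (some v) hne

theorem pv_hloop_partial (row : List (Option String)) :
    ∀ k : Nat, k + 1 ≤ row.length →
      (List.range' 1 k).foldl pvHstep row = pvHfill none (row.take (k + 1)) ++ row.drop (k + 1) := by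
  intro k
  induction k with
  | zero =>
    intro h
    match row, h with
    | x :: xs, _ => cases x <;> simp [pvHfill]
  | succ k ih =>
    intro h
    have hk : k + 1 ≤ row.length := by omega
    have hlt : k + 1 < row.length := by omega
    have hrange : List.range' 1 (k + 1) = List.range' 1 k ++ [k + 1] := by
      simpa [Nat.add_comm] using (List.range'_concat (s := 1) (n := k) (step := 1))
    rw [hrange, List.foldl_append, ih hk]
    have hTlen : (row.take (k + 1)).length = k + 1 := by simp [List.length_take]; omega
    have hTne : row.take (k + 1) ≠ [] := by
      intro hnil; rw [hnil] at hTlen; simp at hTlen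
    have hAlen : (pvHfill none (row.take (k + 1))).length = k + 1 := by
      rw [pvHfill_length, hTlen]
    have hdrop : row.drop (k + 1) = row[k + 1] :: row.drop (k + 2) := List.drop_eq_getElem_cons hlt
    have htake : row.take (k + 2) = row.take (k + 1) ++ [row[k + 1]] := by
      rw [List.take_add_one, List.getElem?_eq_getElem hlt]; rfl
    have hget1 : (pvHfill none (row.take (k + 1)) ++ row.drop (k + 1)).getD (k + 1) none
        = row[k + 1] := by
      rw [List.getD_eq_getElem?_getD, List.getElem?_append_right (by omega), hAlen,
        Nat.sub_self, hdrop]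
      rfl
    have hget0 : (pvHfill none (row.take (k + 1)) ++ row.drop (k + 1)).getD k none
        = pvHlast none (row.take (k + 1)) := by
      rw [List.getD_eq_getElem?_getD, List.getElem?_append_left (by omega),
        ← List.getD_eq_getElem?_getD]
      have h2 := pvHfill_getD_last (row.take (k + 1)) none hTne
      rw [hTlen] at h2
      simpa using h2
    show pvHstep _ (k + 1) = _
    rw [htake, pvHfill_snoc]
    unfold pvHstep
    rw [show k + 1 - 1 = k from rfl, hget1, hget0]
    cases hx : row[k + 1] with
    | some v =>
      rw [if_neg (by simp)]
      rw [hdrop, hx]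
      simp [pvMerge, show k + 1 + 1 = k + 2 from rfl]
    | none =>
      cases hp : pvHlast none (row.take (k + 1)) with
      | none =>
        rw [if_neg (by simp)]
        rw [hdrop, hx]
        simp [pvMerge, show k + 1 + 1 = k + 2 from rfl]
      | some w =>
        rw [if_pos (by simp)]
        rw [List.set_append, hAlen, if_neg (by omega), Nat.sub_self, hdrop, hx]
        simp [pvMerge, show k + 1 + 1 = k + 2 from rfl]

theorem pv_hloop (row : List (Option String)) :
    (List.range' 1 (row.length - 1)).foldl pvHstep row = pvHfill none row := by
  match row with
  | [] => rfl
  | x :: xs =>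
    have h := pv_hloop_partial (x :: xs) xs.length (by simp)
    rw [show (x :: xs).length - 1 = xs.length from rfl, h,
      show xs.length + 1 = (x :: xs).length from rfl, List.take_length, List.drop_length,
      List.append_nil]

theorem pvColfill_length (c : Nat) : ∀ (xs : List (List (Option String))) (p : Option String),
    (pvColfill c p xs).length = xs.length := by
  intro xs
  induction xs with
  | nil => intro p; rfl
  | cons row rest ih => intro p; simp [pvColfill, ih]

theorem pvColfill_rows_length (m c : Nat) : ∀ (xs : List (List (Option String))) (p : Option String),
    (∀ row ∈ xs, row.length = m) → ∀ row ∈ pvColfill c p xs, row.length = m := by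
  intro xs
  induction xs with
  | nil => intro p _ row hr; simp [pvColfill] at hr
  | cons r rest ih =>
    intro p hall row hr
    simp only [pvColfill, List.mem_cons] at hr
    rcases hr with hr | hr
    · rw [hr, List.length_set]; exact hall r (by simp)
    · exact ih _ (fun r' h' => hall r' (by simp [h'])) row hr

theorem pvColfill_snoc (c : Nat) : ∀ (xs : List (List (Option String))) (p : Option String)
    (row : List (Option String)),
    pvColfill c p (xs ++ [row])
      = pvColfill c p xs ++ [row.set c (pvMerge (row.getD c none) (pvClast c p xs))] := by
  intro xs
  induction xs with
  | nil => intro p row; rfl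
  | cons y ys ih => intro p row; simp [pvColfill, pvClast, ih]

theorem pvColfill_getD_last (c : Nat) : ∀ (xs : List (List (Option String))) (p : Option String),
    xs ≠ [] → (∀ row ∈ xs, c < row.length) →
    ((pvColfill c p xs).getD (xs.length - 1) []).getD c none = pvClast c p xs := by
  intro xs
  induction xs with
  | nil => intro _ h; exact fun _ => absurd rfl h
  | cons row rest ih =>
    intro p _ hlen
    cases rest with
    | nil =>
      have hc : c < row.length := hlen row (by simp)
      show ((row.set c (pvMerge (row.getD c none) p)).getD c none) = _
      rw [List.getD_eq_getElem _ _ (by simpa using hc)]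
      rw [List.getElem_set_self (by simpa using hc)]
      rfl
    | cons r2 rs =>
      have hne : (r2 :: rs) ≠ [] := by simp
      have h2 := ih (pvMerge (row.getD c none) p) hne (fun r hr => hlen r (by simp [hr]))
      simpa [pvColfill, pvClast, List.getD_cons_succ] using h2

theorem pv_vloop_partial (m c : Nat) (hc : c < m) (t : List (List (Option String)))
    (hrows : ∀ row ∈ t, row.length = m) :
    ∀ k : Nat, k + 1 ≤ t.length →
      (List.range' 1 k).foldl (fun t' r => pvVstep t' r c) t
        = pvColfill c none (t.take (k + 1)) ++ t.drop (k + 1) := by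
  intro k
  induction k with
  | zero =>
    intro h
    match t, hrows, h with
    | row :: rest, hrows, _ =>
      have hcr : c < row.length := by rw [hrows row (by simp)]; exact hc
      show row :: rest = pvColfill c none [row] ++ rest
      simp only [pvColfill, pvMerge_none_right, List.cons_append, List.nil_append]
      rw [pv_set_getD_self row c hcr]
  | succ k ih =>
    intro h
    have hk : k + 1 ≤ t.length := by omega
    have hlt : k + 1 < t.length := by omega
    have hrange : List.range' 1 (k + 1) = List.range' 1 k ++ [k + 1] := by
      simpa [Nat.add_comm] using (List.range'_concat (s := 1) (n := k) (step := 1))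
    rw [hrange, List.foldl_append, ih hk]
    have hTlen : (t.take (k + 1)).length = k + 1 := by simp [List.length_take]; omega
    have hTne : t.take (k + 1) ≠ [] := by
      intro hnil; rw [hnil] at hTlen; simp at hTlen
    have hTlens : ∀ row ∈ t.take (k + 1), c < row.length := by
      intro row hr
      rw [hrows row (List.mem_of_mem_take hr)]; exact hc
    have hAlen : (pvColfill c none (t.take (k + 1))).length = k + 1 := by
      rw [pvColfill_length, hTlen]
    have hdrop : t.drop (k + 1) = t[k + 1] :: t.drop (k + 2) := List.drop_eq_getElem_cons hlt
    have htake : t.take (k + 2) = t.take (k + 1) ++ [t[k + 1]] := by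
      rw [List.take_add_one, List.getElem?_eq_getElem hlt]; rfl
    have hrowlen : c < (t[k + 1]).length := by
      rw [hrows _ (List.getElem_mem hlt)]; exact hc
    have hget1 : (pvColfill c none (t.take (k + 1)) ++ t.drop (k + 1)).getD (k + 1) []
        = t[k + 1] := by
      rw [List.getD_eq_getElem?_getD, List.getElem?_append_right (by omega), hAlen,
        Nat.sub_self, hdrop]
      rfl
    have hget0 : ((pvColfill c none (t.take (k + 1)) ++ t.drop (k + 1)).getD k []).getD c none
        = pvClast c none (t.take (k + 1)) := by
      have hx : (pvColfill c none (t.take (k + 1)) ++ t.drop (k + 1)).getD k []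
          = (pvColfill c none (t.take (k + 1))).getD k [] := by
        rw [List.getD_eq_getElem?_getD, List.getElem?_append_left (by omega),
          ← List.getD_eq_getElem?_getD]
      rw [hx]
      have h2 := pvColfill_getD_last c (t.take (k + 1)) none hTne hTlens
      rw [hTlen] at h2
      simpa using h2
    show pvVstep _ (k + 1) c = _
    rw [htake, pvColfill_snoc]
    unfold pvVstep pvGetC pvSetC
    rw [show k + 1 - 1 = k from rfl, hget1, hget0]
    cases hx : (t[k + 1]).getD c none with
    | some v =>
      rw [if_neg (by simp)]
      rw [hdrop]
      have : (t[k + 1]).set c (pvMerge (some v) (pvClast c none (t.take (k + 1)))) = t[k + 1] := by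
        rw [show pvMerge (some v) (pvClast c none (t.take (k + 1))) = some v from rfl, ← hx]
        exact pv_set_getD_self _ _ hrowlen
      rw [this]
      simp [show k + 1 + 1 = k + 2 from rfl]
    | none =>
      cases hp : pvClast c none (t.take (k + 1)) with
      | none =>
        rw [if_neg (by simp)]
        rw [hdrop]
        have : (t[k + 1]).set c (pvMerge none none) = t[k + 1] := by
          rw [show pvMerge none none = (none : Option String) from rfl, ← hx]
          exact pv_set_getD_self _ _ hrowlen
        rw [this]
        simp [show k + 1 + 1 = k + 2 from rfl]
      | some w =>
        rw [if_pos (by simp)]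
        rw [List.set_append, hAlen, if_neg (by omega), Nat.sub_self, hdrop]
        simp only [List.set_cons_zero, List.append_assoc, List.cons_append, List.nil_append,
          pvMerge]

theorem pv_vloop (m c : Nat) (hc : c < m) (t : List (List (Option String)))
    (hrows : ∀ row ∈ t, row.length = m) :
    (List.range' 1 (t.length - 1)).foldl (fun t' r => pvVstep t' r c) t = pvColfill c none t := by
  match t, hrows with
  | [], _ => rfl
  | row :: rest, hrows =>
    have h := pv_vloop_partial m c hc (row :: rest) hrows rest.length (by simp)
    rw [show (row :: rest).length - 1 = rest.length from rfl, h,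
      show rest.length + 1 = (row :: rest).length from rfl, List.take_length, List.drop_length,
      List.append_nil]

theorem pv_getD_set_ne (l : List (Option String)) (c c' : Nat) (h : c ≠ c') (v : Option String) :
    (l.set c v).getD c' none = l.getD c' none := by
  simp [List.getD_eq_getElem?_getD, List.getElem?_set_ne h]

theorem pv_fold_colfill_cons : ∀ (cs : List Nat), cs.Nodup →
    ∀ (p : Nat → Option String) (row : List (Option String)) (rest : List (List (Option String))),
    cs.foldl (fun t c => pvColfill c (p c) t) (row :: rest)
      = cs.foldl (fun rw c => rw.set c (pvMerge (rw.getD c none) (p c))) row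
        :: cs.foldl (fun t c => pvColfill c (pvMerge (row.getD c none) (p c)) t) rest := by
  intro cs
  induction cs with
  | nil => intro _ p row rest; rfl
  | cons c cs ih =>
    intro hnd p row rest
    have hnotmem : c ∉ cs := (List.nodup_cons.mp hnd).1
    have hnd' : cs.Nodup := (List.nodup_cons.mp hnd).2
    simp only [List.foldl_cons]
    rw [show pvColfill c (p c) (row :: rest)
        = (row.set c (pvMerge (row.getD c none) (p c)))
          :: pvColfill c (pvMerge (row.getD c none) (p c)) rest from rfl]
    rw [ih hnd' p _ _]
    congr 1
    apply PySem.List.foldl_congr_mem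
    intro acc x hx
    have hne : c ≠ x := fun hcx => hnotmem (hcx ▸ hx)
    rw [pv_getD_set_ne row c x hne]

theorem pv_rowset_fold (m : Nat) (p : Nat → Option String) (row : List (Option String))
    (hlen : row.length = m) :
    (List.range m).foldl (fun rw c => rw.set c (pvMerge (rw.getD c none) (p c))) row
      = List.zipWith pvMerge row ((List.range m).map p) := by
  have key : ∀ k : Nat, k ≤ m →
      (List.range k).foldl (fun rw c => rw.set c (pvMerge (rw.getD c none) (p c))) row
        = List.zipWith pvMerge (row.take k) ((List.range k).map p) ++ row.drop k := by
    intro k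
    induction k with
    | zero => intro _; simp
    | succ k ih =>
      intro h
      have hk : k ≤ m := by omega
      have hlt : k < row.length := by omega
      rw [List.range_succ, List.foldl_append, ih hk]
      simp only [List.foldl_cons, List.foldl_nil]
      have hZlen : (List.zipWith pvMerge (row.take k) ((List.range k).map p)).length = k := by
        simp [List.length_zipWith, List.length_take]; omega
      have hdrop : row.drop k = row[k] :: row.drop (k + 1) := List.drop_eq_getElem_cons hlt
      have htake : row.take (k + 1) = row.take k ++ [row[k]] := by
        rw [List.take_add_one, List.getElem?_eq_getElem hlt]; rfl
      have hget : (List.zipWith pvMerge (row.take k) ((List.range k).map p)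
          ++ row.drop k).getD k none = row[k] := by
        rw [List.getD_eq_getElem?_getD, List.getElem?_append_right (by omega), hZlen,
          Nat.sub_self, hdrop]
        rfl
      rw [hget, List.set_append, hZlen, if_neg (by omega), Nat.sub_self]
      rw [htake, List.map_append,
        List.zipWith_append (by simp [List.length_take]; omega)]
      rw [hdrop]
      simp only [List.set_cons_zero, List.map_cons, List.map_nil, List.zipWith_cons_cons,
        List.zipWith_nil_right, List.append_assoc, List.cons_append, List.nil_append]
  have h := key m le_rfl
  rw [h, show m = row.length from hlen.symm, List.take_length, List.drop_length, List.append_nil]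

theorem pv_map_merge_range (m : Nat) (p : Nat → Option String) (row : List (Option String))
    (hlen : row.length = m) :
    (List.range m).map (fun c => pvMerge (row.getD c none) (p c))
      = List.zipWith pvMerge row ((List.range m).map p) := by
  apply List.ext_getElem
  · simp [List.length_zipWith, hlen]
  · intro i h1 h2
    simp only [List.getElem_map, List.getElem_zipWith, List.getElem_range]
    have hi : i < m := by simpa using h1
    rw [List.getD_eq_getElem _ _ (by omega)]

theorem pv_foldl_colfill_nil (cs : List Nat) (q : Nat → Option String) :
    cs.foldl (fun t c => pvColfill c (q c) t) [] = [] := by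
  induction cs with
  | nil => rfl
  | cons c cs ih => simpa [pvColfill] using ih

theorem pv_fold_colfill_eq_vfill (m : Nat) : ∀ (t : List (List (Option String)))
    (p : Nat → Option String), (∀ row ∈ t, row.length = m) →
    (List.range m).foldl (fun t c => pvColfill c (p c) t) t = pvVfill ((List.range m).map p) t := by
  intro t
  induction t with
  | nil => intro p _; rw [pv_foldl_colfill_nil]; rfl
  | cons row rest ih =>
    intro p hrows
    have hrow : row.length = m := hrows row (by simp)
    rw [pv_fold_colfill_cons (List.range m) List.nodup_range p row rest]
    rw [pv_rowset_fold m p row hrow]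
    rw [ih (fun c => pvMerge (row.getD c none) (p c)) (fun r hr => hrows r (by simp [hr]))]
    rw [pv_map_merge_range m p row hrow]
    rfl

theorem pv_outer_bridge (m n : Nat) : ∀ (cs : List Nat), (∀ c ∈ cs, c < m) →
    ∀ (t : List (List (Option String))), t.length = n → (∀ row ∈ t, row.length = m) →
    cs.foldl (fun t c => (List.range' 1 (n - 1)).foldl (fun t' r => pvVstep t' r c) t) t
      = cs.foldl (fun t c => pvColfill c none t) t := by
  intro cs
  induction cs with
  | nil => intros; rfl
  | cons c cs ih =>
    intro hcs t hlen hrows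
    simp only [List.foldl_cons]
    have hc : c < m := hcs c (by simp)
    have h1 : (List.range' 1 (n - 1)).foldl (fun t' r => pvVstep t' r c) t = pvColfill c none t := by
      rw [← hlen]; exact pv_vloop m c hc t hrows
    rw [h1]
    exact ih (fun c' h' => hcs c' (by simp [h'])) _ (by rw [pvColfill_length, hlen])
      (pvColfill_rows_length m c t none hrows)

-- ===== B-side bridging lemmas =====

theorem pvHlast_snoc (last : Option String) (ys : List (Option String)) (y : Option String) :
    pvHlast last (ys ++ [y]) = pvMerge y (pvHlast last ys) := by
  induction ys generalizing last with
  | nil => cases y <;> rfl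
  | cons z zs ih => cases z <;> simp [pvHlast, ih]

theorem pvHlast_append_replicate (last : Option String) (ys : List (Option String)) (k : Nat) :
    pvHlast last (ys ++ List.replicate k none) = pvHlast last ys := by
  induction k with
  | zero => simp
  | succ k ih =>
    rw [List.replicate_succ' , ← List.append_assoc, pvHlast_snoc, ih]
    rfl

theorem pvHfill_getD_take : ∀ (xs : List (Option String)) (last : Option String) (c : Nat),
    c < xs.length → (pvHfill last xs).getD c none = pvHlast last (xs.take (c + 1)) := by
  intro xs
  induction xs with
  | nil => intro last c h; simp at h
  | cons x xs ih =>
    intro last c h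
    cases c with
    | zero => cases x <;> simp [pvHfill, pvHlast]
    | succ c =>
      have hc : c < xs.length := by simpa using h
      cases x with
      | none => simpa [pvHfill, pvHlast, List.getD_cons_succ] using ih last c hc
      | some v => simpa [pvHfill, pvHlast, List.getD_cons_succ] using ih (some v) c hc

theorem pvScanRow_eq : ∀ (c : Nat) (xs : List (Option String)), c < xs.length →
    pvScanRow xs c = pvHlast none (xs.take (c + 1)) := by
  intro c
  induction c with
  | zero =>
    intro xs h
    match xs with
    | x :: rest => cases x <;> simp [pvScanRow, pvHlast]
  | succ c ih =>
    intro xs h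
    have hc : c < xs.length := by omega
    have htake : xs.take (c + 2) = xs.take (c + 1) ++ [xs[c + 1]] := by
      rw [List.take_add_one, List.getElem?_eq_getElem h]; rfl
    rw [htake, pvHlast_snoc]
    show (match xs.getD (c + 1) none with
      | some v => some v
      | none => pvScanRow xs c) = _
    rw [List.getD_eq_getElem _ _ h]
    cases hx : xs[c + 1] with
    | some v => rfl
    | none => simpa [pvMerge] using ih xs hc

theorem pvHfill_replicate_none (k : Nat) :
    pvHfill none (List.replicate k (none : Option String)) = List.replicate k none := by
  induction k with
  | zero => rfl
  | succ k ih => simp [List.replicate_succ, pvHfill, ih]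

theorem pvG_getD (m : Nat) (row : List (Option String)) (c : Nat)
    (hle : row.length ≤ m) (hc : c < m) :
    (pvG m row).getD c none = pvScanRow row (min c (row.length - 1)) := by
  match row with
  | [] =>
    show (pvHfill none ([] ++ List.replicate (m - 0) none)).getD c none = _
    rw [List.nil_append, Nat.sub_zero, pvHfill_replicate_none]
    simp [pvScanRow, List.getD]
  | x :: xs =>
    set row := x :: xs with hrow
    have hL : 1 ≤ row.length := by simp [hrow]
    have hpadlen : (row ++ List.replicate (m - row.length) (none : Option String)).length = m := by
      simp [List.length_append]; omega
    rw [pvG, pvHfill_getD_take _ none c (by rw [hpadlen]; exact hc)]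
    by_cases hcase : c < row.length
    · have hmin : min c (row.length - 1) = c := by omega
      rw [hmin, pvScanRow_eq c row hcase]
      congr 1
      rw [List.take_append_of_le_length (by omega)]
    · have hmin : min c (row.length - 1) = row.length - 1 := by omega
      rw [hmin, pvScanRow_eq (row.length - 1) row (by omega)]
      rw [show row.length - 1 + 1 = row.length from by omega, List.take_length]
      rw [List.take_append, List.take_of_length_le (by omega), List.take_replicate,
        pvHlast_append_replicate]

theorem pvVfill_length (prev : List (Option String)) : ∀ (rows : List (List (Option String))),
    (pvVfill prev rows).length = rows.length := by
  intro rows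
  induction rows generalizing prev with
  | nil => rfl
  | cons row rest ih => simp [pvVfill, ih]

theorem pvVfill_rows_length (m : Nat) : ∀ (rows : List (List (Option String)))
    (prev : List (Option String)), prev.length = m → (∀ r ∈ rows, r.length = m) →
    ∀ r ∈ pvVfill prev rows, r.length = m := by
  intro rows
  induction rows with
  | nil => intro prev _ _ r hr; simp [pvVfill] at hr
  | cons row rest ih =>
    intro prev hprev hrows r hr
    have hz : (List.zipWith pvMerge row prev).length = m := by
      simp [List.length_zipWith, hprev, hrows row (by simp)]
    simp only [pvVfill, List.mem_cons] at hr
    rcases hr with hr | hr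
    · rw [hr]; exact hz
    · exact ih _ hz (fun r' h' => hrows r' (by simp [h'])) r hr

theorem pv_zip_getD (a b : List (Option String)) (c : Nat) (ha : c < a.length) (hb : c < b.length) :
    (List.zipWith pvMerge a b).getD c none = pvMerge (a.getD c none) (b.getD c none) := by
  rw [List.getD_eq_getElem _ _ (by simp [List.length_zipWith]; omega),
    List.getElem_zipWith, List.getD_eq_getElem _ _ ha, List.getD_eq_getElem _ _ hb]

theorem pvLH_shift (m : Nat) : ∀ (r c : Nat) (rest : List (List (Option String)))
    (row prev : List (Option String)), row.length = m → prev.length = m → c < m →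
    pvLH rest (List.zipWith pvMerge row prev) r c = pvLH (row :: rest) prev (r + 1) c := by
  intro r
  induction r with
  | zero =>
    intro c rest row prev hrow hprev hc
    show pvMerge _ ((List.zipWith pvMerge row prev).getD c none) = pvMerge _ (pvMerge _ _)
    rw [pv_zip_getD row prev c (by omega) (by omega)]
    rfl
  | succ r ih =>
    intro c rest row prev hrow hprev hc
    show pvMerge ((rest.getD (r + 1) []).getD c none) _
      = pvMerge (((row :: rest).getD (r + 2) []).getD c none) _
    rw [ih c rest row prev hrow hprev hc]
    rfl

theorem pvVfill_cell (m : Nat) : ∀ (rows : List (List (Option String)))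
    (prev : List (Option String)) (r c : Nat), r < rows.length →
    (∀ x ∈ rows, x.length = m) → prev.length = m → c < m →
    ((pvVfill prev rows).getD r []).getD c none = pvLH rows prev r c := by
  intro rows
  induction rows with
  | nil => intro prev r c h; simp at h
  | cons row rest ih =>
    intro prev r c hr hrows hprev hc
    have hrow : row.length = m := hrows row (by simp)
    cases r with
    | zero =>
      show (List.zipWith pvMerge row prev).getD c none = _
      rw [pv_zip_getD row prev c (by omega) (by omega)]
      rfl
    | succ r =>
      have hz : (List.zipWith pvMerge row prev).length = m := by
        simp [List.length_zipWith]; omega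
      have h1 : ((pvVfill prev (row :: rest)).getD (r + 1) []).getD c none
          = ((pvVfill (List.zipWith pvMerge row prev) rest).getD r []).getD c none := by
        rfl
      rw [h1, ih _ r c (by simpa using hr) (fun x hx => hrows x (by simp [hx])) hz hc]
      exact pvLH_shift m r c rest row prev hrow hprev hc

theorem pvLookup_eq_pvLH (m : Nat) (tbl : List (List (Option String)))
    (hm : ∀ row ∈ tbl, row.length ≤ m) :
    ∀ (r c : Nat), r < tbl.length → c < m →
    pvLookup tbl r c = pvLH (tbl.map (pvG m)) (List.replicate m none) r c := by
  intro r
  induction r with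
  | zero =>
    intro c hr hc
    have hget : (tbl.map (pvG m)).getD 0 [] = pvG m (tbl.getD 0 []) := by
      rw [List.getD_eq_getElem _ _ (by simpa using hr), List.getElem_map,
        List.getD_eq_getElem _ _ hr]
    show pvScanRow (tbl.getD 0 []) (min c ((tbl.getD 0 []).length - 1))
      = pvMerge (((tbl.map (pvG m)).getD 0 []).getD c none) ((List.replicate m none).getD c none)
    rw [hget, show (List.replicate m (none : Option String)).getD c none = none from by
        simp [List.getD_eq_getElem?_getD], pvMerge_none_right,
      pvG_getD m _ c (hm _ (by rw [List.getD_eq_getElem _ _ hr]; exact List.getElem_mem hr)) hc]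
  | succ r ih =>
    intro c hr hc
    have hr1 : r + 1 < tbl.length := hr
    have hget : (tbl.map (pvG m)).getD (r + 1) [] = pvG m (tbl.getD (r + 1) []) := by
      rw [List.getD_eq_getElem _ _ (by simpa using hr1), List.getElem_map,
        List.getD_eq_getElem _ _ hr1]
    have hmem : tbl.getD (r + 1) [] ∈ tbl := by
      rw [List.getD_eq_getElem _ _ hr1]; exact List.getElem_mem hr1
    have hscan : pvScanRow (tbl.getD (r + 1) []) (min c ((tbl.getD (r + 1) []).length - 1))
        = ((tbl.map (pvG m)).getD (r + 1) []).getD c none := by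
      rw [hget, pvG_getD m _ c (hm _ hmem) hc]
    show (match pvScanRow (tbl.getD (r + 1) []) (min c ((tbl.getD (r + 1) []).length - 1)) with
      | some v => some v
      | none => pvLookup tbl r c) = pvMerge (((tbl.map (pvG m)).getD (r + 1) []).getD c none) _
    rw [hscan, ih c (by omega) hc]
    cases ((tbl.map (pvG m)).getD (r + 1) []).getD c none <;> rfl

-- ===== VERDICT (by name: the statement is the Claim_ definition above) =====
theorem fill_merged_cells_spec : Claim_equal_fill_merged_cells := by
  intro tbl _
  unfold Spec_fill_merged_cells
  match tbl with
  | [] => rfl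
  | r0 :: rest =>
    have hm : ∀ row ∈ (r0 :: rest), row.length
        ≤ ((r0 :: rest).map (fun row => row.length)).foldl max 0 := by
      intro row hr
      exact (PySem.List.le_foldl_max _ 0).2 row.length (List.mem_map_of_mem hr)
    set m := ((r0 :: rest).map (fun row => row.length)).foldl max 0 with hmdef
    have hpadlen : ∀ row ∈ (r0 :: rest),
        (row ++ List.replicate (m - row.length) (none : Option String)).length = m := by
      intro row hr
      have := hm row hr
      simp [List.length_append]; omega
    -- A's horizontal stage is pvG applied rowwise
    have ht2 : ((r0 :: rest).map (fun row => row ++ List.replicate (m - row.length) none)).map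
          (fun row => (List.range' 1 (m - 1)).foldl pvHstep row)
        = (r0 :: rest).map (pvG m) := by
      rw [List.map_map]
      apply List.map_congr_left
      intro row hr
      show (List.range' 1 (m - 1)).foldl pvHstep (row ++ List.replicate (m - row.length) none)
          = pvG m row
      rw [show m - 1 = (row ++ List.replicate (m - row.length) (none : Option String)).length - 1
          by rw [hpadlen row hr]]
      exact pv_hloop _
    have hglen : ∀ row ∈ (r0 :: rest), (pvG m row).length = m := by
      intro row hr
      rw [pvG, pvHfill_length]
      exact hpadlen row hr
    have hrowsG : ∀ row' ∈ (r0 :: rest).map (pvG m), row'.length = m := by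
      intro row' hr'
      rcases List.mem_map.mp hr' with ⟨row, hr, hrow⟩
      rw [← hrow]; exact hglen row hr
    -- A side
    have hA : fill_merged_cells (r0 :: rest)
        = pvVfill (List.replicate m none) ((r0 :: rest).map (pvG m)) := by
      show (List.range m).foldl
          (fun t c => (List.range' 1 ((r0 :: rest).length - 1)).foldl (fun t' r => pvVstep t' r c) t)
          (((r0 :: rest).map (fun row => row ++ List.replicate (m - row.length) none)).map
            (fun row => (List.range' 1 (m - 1)).foldl pvHstep row))
        = _
      rw [ht2]
      rw [pv_outer_bridge m (r0 :: rest).length (List.range m)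
        (fun c hc => List.mem_range.mp hc) _ (by simp) hrowsG]
      rw [pv_fold_colfill_eq_vfill m _ (fun _ => none) hrowsG]
      rw [List.map_const', List.length_range]
    -- B side
    have hB : fill_merged_cells_alt (r0 :: rest)
        = (List.range (r0 :: rest).length).map
            (fun r => (List.range m).map (fun c => pvLookup (r0 :: rest) r c)) := by
      rfl
    rw [hA, hB]
    -- cell-by-cell
    apply List.ext_getElem
    · simp [pvVfill_length]
    · intro r h1 h2
      have hr : r < (r0 :: rest).length := by
        rw [pvVfill_length] at h1; simpa using h1
      have hrowlen : ((pvVfill (List.replicate m none) ((r0 :: rest).map (pvG m)))[r]).length = m := by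
        apply pvVfill_rows_length m ((r0 :: rest).map (pvG m)) (List.replicate m none)
          (List.length_replicate) hrowsG
        exact List.getElem_mem h1
      rw [List.getElem_map, List.getElem_range]
      apply List.ext_getElem
      · rw [List.length_map, List.length_range]; exact hrowlen
      · intro c hc1 hc2
        have hcm : c < m := by simpa using hc2
        have hcell := pvVfill_cell m ((r0 :: rest).map (pvG m)) (List.replicate m none) r c
          (by simpa using hr) hrowsG (by simp) hcm
        have hlk := pvLookup_eq_pvLH m (r0 :: rest) (fun row h => hm row h) r c hr hcm
        rw [List.getElem_map, List.getElem_range]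
        rw [show ((pvVfill (List.replicate m none) ((r0 :: rest).map (pvG m)))[r])[c]
            = (((pvVfill (List.replicate m none) ((r0 :: rest).map (pvG m))).getD r []).getD c none)
          from by
            rw [List.getD_eq_getElem _ _ h1]
            exact (List.getD_eq_getElem _ _ hc1).symm]
        rw [hcell, hlk]
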